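-- pv_equiv track=rewrite | github.com/cyb3rk0tik/KD6-3.7 | utils.py | check_string_type
-- ===== SOURCE A (Python) =====
-- def check_string_type(string):
--     string_type = ''
--     for s in string:
--         if s.isdecimal():
--             if string_type.find('d') == -1:
--                 string_type += 'd'
--
--         if s.isalpha() or s in ['-', '+']:
--             if string_type.find('a') == -1:
--                 string_type += 'a'
--     return string_type
-- ===== SOURCE B (Python) =====
-- def check_string_type(string):
--     d = next((i for i, s in enumerate(string) if s.isdecimal()), None)
--     a = next((i for i, s in enumerate(string) if s.isalpha() or s in ('-', '+')), None)
--     if d is None: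
--         return '' if a is None else 'a'
--     if a is None:
--         return 'd'
--     return 'da' if d < a else 'ad'
-- ===== Notes on version B (the rewrite author's own statement) =====
-- stated objective: alternative
-- what changed: Replaces the incremental string-building scan (append 'd'/'a' guarded by substring find) with two first-occurrence index computations followed by one constant ordering decision.
import Mathlib
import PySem

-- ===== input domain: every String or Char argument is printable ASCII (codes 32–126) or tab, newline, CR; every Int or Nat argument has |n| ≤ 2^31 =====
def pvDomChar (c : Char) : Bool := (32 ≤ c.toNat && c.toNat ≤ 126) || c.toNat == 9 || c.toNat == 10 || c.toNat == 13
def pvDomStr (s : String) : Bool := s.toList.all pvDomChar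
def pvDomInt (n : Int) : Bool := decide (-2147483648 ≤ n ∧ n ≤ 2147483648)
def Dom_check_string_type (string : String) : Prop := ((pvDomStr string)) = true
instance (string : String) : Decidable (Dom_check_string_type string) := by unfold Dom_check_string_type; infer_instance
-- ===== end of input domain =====

-- B replaces A's incremental string-building scan by two first-occurrence indices
-- plus one constant ordering decision (alternative decomposition, same cost).

-- ===== PORT A =====
-- the loop body of A, one character step (isdecimal = isdigit on the ASCII domain)
def cstStep (string_type : String) (s : Char) : String :=
  let string_type :=
    if PySem.Chars.isdigit s then
      (if PySem.Str.find string_type "d" == -1 then string_type ++ "d" else string_type)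
    else string_type
  if PySem.Chars.isalpha s || s == '-' || s == '+' then
    (if PySem.Str.find string_type "a" == -1 then string_type ++ "a" else string_type)
  else string_type

def check_string_type (string : String) : String :=
  string.toList.foldl cstStep ""

-- ===== PORT B =====
def csdAlphaSign (s : Char) : Bool := PySem.Chars.isalpha s || s == '-' || s == '+'

def check_string_type_alt (string : String) : String :=
  let d := string.toList.findIdx? PySem.Chars.isdigit
  let a := string.toList.findIdx? csdAlphaSign
  match d, a with
  | none,   none   => ""
  | none,   some _ => "a"
  | some _, none   => "d"
  | some i, some j => if i < j then "da" else "ad"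

-- ===== PRECONDITION & SPEC =====
def Spec_check_string_type (string : String) (out : String) : Prop := out = check_string_type_alt string
instance (string : String) (out : String) : Decidable (Spec_check_string_type string out) := by unfold Spec_check_string_type; infer_instance

-- ===== CLAIM (what is proved, stated in full; the proofs are below) =====
def Claim_equal_check_string_type : Prop := ∀ (string : String), Dom_check_string_type string → Spec_check_string_type string (check_string_type string)

-- ===== LEMMAS AND PROOFS =====

-- B's result, expressed on the character list
def csdB (l : List Char) : String :=
  match l.findIdx? PySem.Chars.isdigit, l.findIdx? csdAlphaSign with
  | none,   none   => ""
  | none,   some _ => "a"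
  | some _, none   => "d"
  | some i, some j => if i < j then "da" else "ad"

-- no ASCII character is both a decimal digit and an alpha/sign character
theorem csd_excl (c : Char) (h : PySem.Chars.isdigit c = true) : csdAlphaSign c = false := by
  simp only [PySem.Chars.isdigit, Bool.and_eq_true, decide_eq_true_eq, Char.le_def,
    UInt32.le_iff_toNat_le, show '0'.val.toNat = 48 from rfl, show '9'.val.toNat = 57 from rfl] at h
  simp only [csdAlphaSign, PySem.Chars.isalpha, PySem.Chars.isupper, PySem.Chars.islower,
    Bool.or_eq_false_iff, Bool.and_eq_false_iff, decide_eq_false_iff_not, Char.le_def,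
    UInt32.le_iff_toNat_le, beq_eq_false_iff_ne, ne_eq, Char.ext_iff,
    show 'A'.val.toNat = 65 from rfl, show 'Z'.val.toNat = 90 from rfl,
    show 'a'.val.toNat = 97 from rfl, show 'z'.val.toNat = 122 from rfl]
  refine ⟨⟨⟨Or.inl (by omega), Or.inl (by omega)⟩, fun he => ?_⟩, fun he => ?_⟩ <;>
    (rw [he] at h; revert h; decide)

theorem csd_none_iff (p : Char → Bool) (l : List Char) :
    l.findIdx? p = none ↔ l.any p = false := by
  simp [List.findIdx?_eq_none_iff, List.any_eq_false]

-- A's loop from each reachable accumulator value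
theorem csd_main (l : List Char) :
    l.foldl cstStep "" = csdB l ∧
    l.foldl cstStep "d" = (if l.any csdAlphaSign then "da" else "d") ∧
    l.foldl cstStep "a" = (if l.any PySem.Chars.isdigit then "ad" else "a") ∧
    l.foldl cstStep "da" = "da" ∧
    l.foldl cstStep "ad" = "ad" := by
  induction l with
  | nil => exact ⟨rfl, rfl, rfl, rfl, rfl⟩
  | cons c l ih =>
    obtain ⟨ih0, ihd, iha, ihda, ihad⟩ := ih
    by_cases hd : PySem.Chars.isdigit c = true
    · have ha : csdAlphaSign c = false := csd_excl c hd
      have ha' : (PySem.Chars.isalpha c || c == '-' || c == '+') = false := ha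
      have hstep0 : cstStep "" c = "d" := by simp only [cstStep, hd, ha']; decide
      have hstepd : cstStep "d" c = "d" := by simp only [cstStep, hd, ha']; decide
      have hstepa : cstStep "a" c = "ad" := by simp only [cstStep, hd, ha']; decide
      have hstepda : cstStep "da" c = "da" := by simp only [cstStep, hd, ha']; decide
      have hstepad : cstStep "ad" c = "ad" := by simp only [cstStep, hd, ha']; decide
      refine ⟨?_, ?_, ?_, ?_, ?_⟩
      · rw [List.foldl_cons, hstep0, ihd]
        cases hfa : l.findIdx? csdAlphaSign with
        | none =>
          have hany := (csd_none_iff csdAlphaSign l).mp hfa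
          simp [csdB, List.findIdx?_cons, hd, ha, hfa, hany]
        | some j =>
          have hany : l.any csdAlphaSign = true := by
            by_contra hc
            rw [(csd_none_iff csdAlphaSign l).mpr (by simpa using hc)] at hfa; simp at hfa
          simp [csdB, List.findIdx?_cons, hd, ha, hfa, hany]
      · rw [List.foldl_cons, hstepd, ihd, List.any_cons, ha, Bool.false_or]
      · rw [List.foldl_cons, hstepa, ihad, List.any_cons, hd, Bool.true_or]; rfl
      · rw [List.foldl_cons, hstepda, ihda]
      · rw [List.foldl_cons, hstepad, ihad]
    · have hd' : PySem.Chars.isdigit c = false := by simpa using hd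
      by_cases ha : csdAlphaSign c = true
      · have ha' : (PySem.Chars.isalpha c || c == '-' || c == '+') = true := ha
        have hstep0 : cstStep "" c = "a" := by simp only [cstStep, hd', ha']; decide
        have hstepd : cstStep "d" c = "da" := by simp only [cstStep, hd', ha']; decide
        have hstepa : cstStep "a" c = "a" := by simp only [cstStep, hd', ha']; decide
        have hstepda : cstStep "da" c = "da" := by simp only [cstStep, hd', ha']; decide
        have hstepad : cstStep "ad" c = "ad" := by simp only [cstStep, hd', ha']; decide
        refine ⟨?_, ?_, ?_, ?_, ?_⟩
        · rw [List.foldl_cons, hstep0, iha]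
          cases hfd : l.findIdx? PySem.Chars.isdigit with
          | none =>
            have hany := (csd_none_iff PySem.Chars.isdigit l).mp hfd
            simp [csdB, List.findIdx?_cons, hd', ha, hfd, hany]
          | some j =>
            have hany : l.any PySem.Chars.isdigit = true := by
              by_contra hc
              rw [(csd_none_iff PySem.Chars.isdigit l).mpr (by simpa using hc)] at hfd
              simp at hfd
            simp [csdB, List.findIdx?_cons, hd', ha, hfd, hany]
        · rw [List.foldl_cons, hstepd, ihda, List.any_cons, ha, Bool.true_or]; rfl
        · rw [List.foldl_cons, hstepa, iha, List.any_cons, hd', Bool.false_or]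
        · rw [List.foldl_cons, hstepda, ihda]
        · rw [List.foldl_cons, hstepad, ihad]
      · have ha' : (PySem.Chars.isalpha c || c == '-' || c == '+') = false := by
          rw [Bool.not_eq_true] at ha; exact ha
        have hstep : ∀ acc, cstStep acc c = acc := by
          intro acc; simp only [cstStep, hd', ha']; simp
        refine ⟨?_, ?_, ?_, ?_, ?_⟩
        · rw [List.foldl_cons, hstep, ih0]
          have haf : csdAlphaSign c = false := by rw [Bool.not_eq_true] at ha; exact ha
          cases hfd : l.findIdx? PySem.Chars.isdigit <;>
            cases hfa : l.findIdx? csdAlphaSign <;>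
              simp [csdB, List.findIdx?_cons, hd', haf, hfd, hfa]
        · rw [List.foldl_cons, hstep, ihd, List.any_cons,
            (by rw [Bool.not_eq_true] at ha; exact ha : csdAlphaSign c = false), Bool.false_or]
        · rw [List.foldl_cons, hstep, iha, List.any_cons, hd', Bool.false_or]
        · rw [List.foldl_cons, hstep, ihda]
        · rw [List.foldl_cons, hstep, ihad]

-- ===== VERDICT (by name: the statement is the Claim_ definition above) =====
theorem check_string_type_spec : Claim_equal_check_string_type := by
  intro s _
  unfold Spec_check_string_type check_string_type check_string_type_alt
  exact (csd_main s.toList).1
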